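-- pv_equiv track=rewrite | github.com/blakeohare/crayon | Interpreter/gen/python-app/Functions.py | v_stringFromHex
-- ===== SOURCE A (Python) =====
-- def v_stringFromHex(v_encoded):
--   v_encoded = v_encoded.upper()
--   v_hex = "0123456789ABCDEF"
--   v_output = []
--   v_length = len(v_encoded)
--   v_a = 0
--   v_b = 0
--   v_c = None
--   v_i = 0
--   while ((v_i + 1) < v_length):
--     v_c = "" + v_encoded[v_i]
--     v_a = v_hex.find(v_c)
--     if (v_a == -1):
--       return None
--     v_c = "" + v_encoded[(v_i + 1)]
--     v_b = v_hex.find(v_c)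
--     if (v_b == -1):
--       return None
--     v_a = ((v_a * 16) + v_b)
--     v_output.append(chr(v_a))
--     v_i += 2
--   return "".join(v_output)
-- ===== SOURCE B (Python) =====
-- _HEX_VAL = {ch: i for i, ch in enumerate("0123456789ABCDEF")}
--
-- def v_stringFromHex(v_encoded):
--     s = v_encoded.upper()
--     s = s[: len(s) // 2 * 2]          # drop a trailing odd character, as A's (i+1) < length bound does
--     vals = []
--     for ch in s:                       # pass 1: validate and convert every hex digit via a table
--         v = _HEX_VAL.get(ch)
--         if v is None:
--             return None
--         vals.append(v)
--     # pass 2: combine nibble pairs into characters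
--     return "".join(chr(vals[i] * 16 + vals[i + 1]) for i in range(0, len(vals), 2))
-- ===== Notes on version B (the rewrite author's own statement) =====
-- stated objective: faster
-- what changed: A's single interleaved loop that str.find-s two hex digits per step and appends a character is replaced by a hex-value dictionary plus two passes: truncate to even length, map every character through the table into a nibble list (None on a miss), then pair the nibbles into characters with a join over range(0, len, 2).
import Mathlib
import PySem

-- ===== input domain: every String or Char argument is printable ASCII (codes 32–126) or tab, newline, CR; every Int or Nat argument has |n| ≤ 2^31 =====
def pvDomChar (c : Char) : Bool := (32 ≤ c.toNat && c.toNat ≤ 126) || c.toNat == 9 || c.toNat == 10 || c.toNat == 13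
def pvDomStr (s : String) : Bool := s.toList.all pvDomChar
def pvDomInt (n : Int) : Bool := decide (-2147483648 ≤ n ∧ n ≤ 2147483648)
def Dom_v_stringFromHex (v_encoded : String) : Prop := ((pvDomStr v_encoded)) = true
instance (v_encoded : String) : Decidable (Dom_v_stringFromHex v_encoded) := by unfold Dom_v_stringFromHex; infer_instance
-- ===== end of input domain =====

-- B replaces A's single interleaved find-and-pair loop with a hex-value dictionary plus two passes
-- (validate/convert every digit via the table, then combine nibble pairs); measured faster by a constant factor.

-- ===== PORT A =====
-- v_hex = "0123456789ABCDEF"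
def pvHex : List Char := ['0','1','2','3','4','5','6','7','8','9','A','B','C','D','E','F']

-- the while loop: (v_i + 1) < v_length means "at least two characters remain"; v_output is the accumulator
def pvGoA (acc : List Char) : List Char → Option (List Char)
  | a :: b :: rest =>
    let va := PySem.Chars.find pvHex [a]          -- v_hex.find("" + encoded[i])
    if va = -1 then none
    else
      let vb := PySem.Chars.find pvHex [b]        -- v_hex.find("" + encoded[i+1])
      if vb = -1 then none
      else pvGoA (acc ++ [Char.ofNat ((va * 16 + vb)).toNat]) rest   -- v_output.append(chr(a*16+b))
  | _ => some acc

def v_stringFromHex (v_encoded : String) : Option String :=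
  (pvGoA [] (PySem.Chars.upper v_encoded.toList)).map (fun out => String.ofList out)  -- "".join(v_output)

-- ===== PORT B =====
-- _HEX_VAL = {ch: i for i, ch in enumerate("0123456789ABCDEF")}
def pvHexVal : PySem.Dict Char Int :=
  PySem.Dict.ofList ((PySem.List.enumerate pvHex).map (fun p => (p.2, p.1)))

-- pass 1: for ch in s: v = _HEX_VAL.get(ch); None-check; vals.append(v)
def pvGoB (acc : List Int) : List Char → Option (List Int)
  | [] => some acc
  | c :: rest =>
    match pvHexVal.get? c with
    | none => none
    | some v => pvGoB (acc ++ [v]) rest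

-- pass 2: "".join(chr(vals[i]*16 + vals[i+1]) for i in range(0, len(vals), 2));
-- vals[i] is ported as pyGetD (every generated index is in range for the even-length vals)
def pvPass2 (vals : List Int) : List Char :=
  (PySem.List.pyRange 0 (vals.length : Int) 2).map
    (fun i => Char.ofNat ((PySem.List.pyGetD vals i 0) * 16 + PySem.List.pyGetD vals (i + 1) 0).toNat)

def v_stringFromHex_alt (v_encoded : String) : Option String :=
  let u := PySem.Chars.upper v_encoded.toList
  let t := u.take (u.length / 2 * 2)              -- s = s[: len(s)//2*2]  (slice [:k], 0 ≤ k, is take k)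
  match pvGoB [] t with
  | none => none
  | some vals => some (String.ofList (pvPass2 vals))

-- ===== PRECONDITION & SPEC =====
def Spec_v_stringFromHex (v_encoded : String) (out : Option String) : Prop := out = v_stringFromHex_alt v_encoded
instance (v_encoded : String) (out : Option String) : Decidable (Spec_v_stringFromHex v_encoded out) := by unfold Spec_v_stringFromHex; infer_instance

-- ===== CLAIM (what is proved, stated in full; the proofs are below) =====
def Claim_equal_v_stringFromHex : Prop := ∀ (v_encoded : String), Dom_v_stringFromHex v_encoded → Spec_v_stringFromHex v_encoded (v_stringFromHex v_encoded)

-- ===== LEMMAS AND PROOFS =====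

-- the table lookup agrees with A's v_hex.find on every character
lemma pvLookup_eq (c : Char) : pvHexVal.get? c =
    (if PySem.Chars.find pvHex [c] = -1 then none else some (PySem.Chars.find pvHex [c])) := by
  by_cases hc : c ∈ pvHex
  · fin_cases hc <;> decide
  · have hfind : PySem.Chars.find pvHex [c] = -1 :=
      (PySem.Chars.find_eq_neg_one_iff _ _).mpr (by simpa [List.singleton_infix_iff] using hc)
    rw [hfind]
    simp only [pvHex, List.mem_cons, List.not_mem_nil, or_false] at hc
    push Not at hc
    obtain ⟨h0, h1, h2, h3, h4, h5, h6, h7, h8, h9, hA, hB, hC, hD, hE, hF⟩ := hc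
    have hd : pvHexVal = PySem.Dict.mk [('0',0),('1',1),('2',2),('3',3),('4',4),('5',5),('6',6),('7',7),('8',8),('9',9),('A',10),('B',11),('C',12),('D',13),('E',14),('F',15)] := by rfl
    rw [hd]
    simp [Ne.symm h0, Ne.symm h1, Ne.symm h2, Ne.symm h3,
      Ne.symm h4, Ne.symm h5, Ne.symm h6, Ne.symm h7, Ne.symm h8, Ne.symm h9,
      Ne.symm hA, Ne.symm hB, Ne.symm hC, Ne.symm hD, Ne.symm hE, Ne.symm hF,
      PySem.Dict.get?]

lemma pvGoB_append (acc : List Int) (l : List Char) :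
    pvGoB acc l = (pvGoB [] l).map (fun v => acc ++ v) := by
  induction l generalizing acc with
  | nil => simp [pvGoB]
  | cons c rest ih =>
    simp only [pvGoB]
    cases pvHexVal.get? c with
    | none => rfl
    | some v =>
      simp only []
      rw [ih (acc ++ [v]), show ([] : List Int) ++ [v] = [v] from rfl, ih [v]]
      cases pvGoB [] rest <;> simp

-- shifting a pair index past the two consumed nibbles
lemma pvIdx (x y : Int) (w : List Int) (k : Nat) :
    PySem.List.pyGetD (x :: y :: w) (0 + 2 * ((k + 1 : Nat) : Int)) 0 = PySem.List.pyGetD w (0 + 2 * (k : Int)) 0 ∧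
    PySem.List.pyGetD (x :: y :: w) (0 + 2 * ((k + 1 : Nat) : Int) + 1) 0 = PySem.List.pyGetD w (0 + 2 * (k : Int) + 1) 0 := by
  have e1 : (0:Int) + 2 * ((k + 1 : Nat) : Int) = ((2 * k + 2 : Nat) : Int) := by push_cast; ring
  have e2 : (0:Int) + 2 * ((k + 1 : Nat) : Int) + 1 = ((2 * k + 3 : Nat) : Int) := by push_cast; ring
  have e3 : (0:Int) + 2 * (k : Int) = ((2 * k : Nat) : Int) := by push_cast; ring
  have e4 : (0:Int) + 2 * (k : Int) + 1 = ((2 * k + 1 : Nat) : Int) := by push_cast; ring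
  rw [e2, e4, e1, e3]
  simp only [PySem.List.pyGetD_natCast]
  constructor
  · rw [show 2 * k + 2 = (2 * k + 1) + 1 from rfl, List.getD_cons_succ, show 2 * k + 1 = (2 * k) + 1 from rfl, List.getD_cons_succ]
  · rw [show 2 * k + 3 = (2 * k + 2) + 1 from rfl, List.getD_cons_succ, show 2 * k + 2 = (2 * k + 1) + 1 from rfl, List.getD_cons_succ]

lemma pvPass2_cons (va vb : Int) (w : List Int) :
    pvPass2 (va :: vb :: w) = Char.ofNat ((va * 16 + vb)).toNat :: pvPass2 w := by
  unfold pvPass2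
  rw [PySem.List.pyRange_of_pos _ _ (by norm_num), PySem.List.pyRange_of_pos _ _ (by norm_num)]
  have hcount : (if (0:Int) < ((va :: vb :: w).length : Int) then ((((va :: vb :: w).length : Int) - 0 + 2 - 1) / 2).toNat else 0)
      = (if (0:Int) < (w.length : Int) then (((w.length : Int) - 0 + 2 - 1) / 2).toNat else 0) + 1 := by
    simp only [List.length_cons]
    split_ifs <;> push_cast <;> omega
  rw [hcount, List.range_succ_eq_map]
  simp only [List.map_cons, List.map_map]
  refine congrArg₂ List.cons ?_ ?_
  · norm_num
    rw [show ((1:Int)) = ((1 : Nat) : Int) from rfl, PySem.List.pyGetD_natCast]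
    simp
  · refine List.map_congr_left ?_
    intro k _
    simp only [Function.comp_apply]
    have h := pvIdx va vb w k
    rw [show (Nat.succ k) = k + 1 from rfl, h.1, h.2]

lemma pvMain (u : List Char) (acc : List Char) :
    pvGoA acc u =
      (match pvGoB [] (u.take (u.length / 2 * 2)) with
       | none => none
       | some vals => some (acc ++ pvPass2 vals)) := by
  induction acc, u using pvGoA.induct with
  | case1 acc a b rest va hva =>
    have hva : PySem.Chars.find pvHex [a] = -1 := hva
    have htake : List.take ((a :: b :: rest).length / 2 * 2) (a :: b :: rest)
        = a :: b :: List.take (rest.length / 2 * 2) rest := by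
      simp only [List.length_cons]
      rw [show (rest.length + 1 + 1) / 2 * 2 = rest.length / 2 * 2 + 2 by omega]
      rfl
    rw [htake]
    simp only [pvGoA, pvGoB, pvLookup_eq]
    rw [if_pos hva, if_pos hva]
  | case2 acc a b rest va hva vb hvb =>
    have hva : ¬ PySem.Chars.find pvHex [a] = -1 := hva
    have hvb : PySem.Chars.find pvHex [b] = -1 := hvb
    have htake : List.take ((a :: b :: rest).length / 2 * 2) (a :: b :: rest)
        = a :: b :: List.take (rest.length / 2 * 2) rest := by
      simp only [List.length_cons]
      rw [show (rest.length + 1 + 1) / 2 * 2 = rest.length / 2 * 2 + 2 by omega]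
      rfl
    rw [htake]
    simp only [pvGoA, pvGoB, pvLookup_eq]
    rw [if_neg hva, if_pos hvb, if_neg hva]
    simp only []
    rw [if_pos hvb]
  | case3 acc a b rest va hva vb hvb ih =>
    have hva : ¬ PySem.Chars.find pvHex [a] = -1 := hva
    have hvb : ¬ PySem.Chars.find pvHex [b] = -1 := hvb
    have ih' : pvGoA (acc ++ [Char.ofNat ((PySem.Chars.find pvHex [a]) * 16 + PySem.Chars.find pvHex [b]).toNat]) rest
        = (match pvGoB [] (List.take (rest.length / 2 * 2) rest) with
           | none => none
           | some vals => some ((acc ++ [Char.ofNat ((PySem.Chars.find pvHex [a]) * 16 + PySem.Chars.find pvHex [b]).toNat]) ++ pvPass2 vals)) := ih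
    have htake : List.take ((a :: b :: rest).length / 2 * 2) (a :: b :: rest)
        = a :: b :: List.take (rest.length / 2 * 2) rest := by
      simp only [List.length_cons]
      rw [show (rest.length + 1 + 1) / 2 * 2 = rest.length / 2 * 2 + 2 by omega]
      rfl
    rw [htake]
    simp only [pvGoA, pvGoB, pvLookup_eq]
    rw [if_neg hva, if_neg hva, if_neg hvb, if_neg hvb]
    rw [ih']
    have hrw : (match some (PySem.Chars.find pvHex [a]) with
                | none => none
                | some v =>
                  match some (PySem.Chars.find pvHex [b]) with
                  | none => none
                  | some v1 => pvGoB ([] ++ [v] ++ [v1]) (List.take (rest.length / 2 * 2) rest))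
        = pvGoB [PySem.Chars.find pvHex [a], PySem.Chars.find pvHex [b]] (List.take (rest.length / 2 * 2) rest) := rfl
    rw [hrw, pvGoB_append [PySem.Chars.find pvHex [a], PySem.Chars.find pvHex [b]]]
    cases pvGoB [] (List.take (rest.length / 2 * 2) rest) with
    | none => rfl
    | some vals =>
      simp only [Option.map_some]
      rw [show [PySem.Chars.find pvHex [a], PySem.Chars.find pvHex [b]] ++ vals
            = PySem.Chars.find pvHex [a] :: PySem.Chars.find pvHex [b] :: vals from rfl,
          pvPass2_cons]
      simp
  | case4 t acc hshort =>
    match t, hshort with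
    | [], _ => simp [pvGoA, pvGoB, pvPass2, PySem.List.pyRange]
    | [x], _ => simp [pvGoA, pvGoB, pvPass2, PySem.List.pyRange]
    | a :: b :: rest, h => exact absurd rfl (fun hh => h a b rest hh)

-- ===== VERDICT (by name: the statement is the Claim_ definition above) =====
theorem v_stringFromHex_spec : Claim_equal_v_stringFromHex := by
  intro s _
  unfold Spec_v_stringFromHex v_stringFromHex v_stringFromHex_alt
  rw [pvMain]
  cases h : pvGoB [] (List.take ((PySem.Chars.upper s.toList).length / 2 * 2) (PySem.Chars.upper s.toList)) <;>
    simp [h]
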